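-- pv_equiv track=rewrite | github.com/shendt/BlahKarutaHelper | Python Scripts/cardLookup.py | next_card_code
-- ===== SOURCE A (Python) =====
-- def next_card_code(card_code):
--     #the characters used in karuta card codes
--     characters_string="0123456789bcdfghjklmnpqrstvwxz"
--     last_char = card_code[-1]
--     if (last_char == 'z'):
--         if (len(card_code) <= 1):
--             return "00"
--         return next_card_code(card_code[0: -1]) + '0'
--     last_char_index = characters_string.find(card_code[-1])
--     next_char = characters_string[last_char_index + 1]
--     return card_code[0: -1] + next_char
-- ===== SOURCE B (Python) =====
-- def next_card_code(card_code):
--     characters_string = "0123456789bcdfghjklmnpqrstvwxz"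
--     n = len(card_code)
--     # count trailing 'z' characters with an index loop instead of recursion
--     t = 0
--     while t < n and card_code[n - 1 - t] == 'z':
--         t += 1
--     if t == n:
--         return "0" * (n + 1)
--     bumped = characters_string[characters_string.find(card_code[n - 1 - t]) + 1]
--     return card_code[: n - 1 - t] + bumped + "0" * t
-- ===== Notes on version B (the rewrite author's own statement) =====
-- stated objective: simpler
-- what changed: Replaces A's recursion (peel one trailing 'z' per call, rebuilding via string slices) by a single index loop that counts the trailing 'z' run, then one slice + bumped character + '0'*t; no recursion and no repeated slicing.
import Mathlib
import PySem

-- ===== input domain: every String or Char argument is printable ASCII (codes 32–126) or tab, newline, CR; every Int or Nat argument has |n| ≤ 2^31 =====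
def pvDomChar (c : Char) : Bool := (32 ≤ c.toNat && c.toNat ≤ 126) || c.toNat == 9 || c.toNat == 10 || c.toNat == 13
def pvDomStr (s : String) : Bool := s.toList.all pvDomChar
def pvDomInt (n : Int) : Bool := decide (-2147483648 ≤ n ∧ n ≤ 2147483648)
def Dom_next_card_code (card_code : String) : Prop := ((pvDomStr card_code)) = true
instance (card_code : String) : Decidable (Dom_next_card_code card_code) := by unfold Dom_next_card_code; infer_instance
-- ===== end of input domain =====

-- B replaces A's recursion by one index loop counting the trailing 'z' run (objective: simpler).
-- A raises IndexError on "" (the only input excluded by Pre_).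

-- ===== PORT A =====
-- the characters used in karuta card codes
def pvChars : List Char := "0123456789bcdfghjklmnpqrstvwxz".toList

-- str.find on a single character: first index, -1 if absent
def pvFind (c : Char) : Int :=
  match pvChars.idxOf? c with
  | some i => (i : Int)
  | none => -1

-- A's recursion, transcribed over the REVERSED character list (card_code[-1] is the head;
-- dropping the last character is recursing on the tail; '+ "0"' prepends '0' to the reversed result).
-- The [] case is Python's IndexError on card_code[-1] (excluded by Pre_).
def nextRevA : List Char → List Char
  | [] => []
  | c :: rest =>
    if c = 'z' then
      if rest = [] then ['0', '0']
      else '0' :: nextRevA rest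
    else
      pvChars.getD (pvFind c + 1).toNat '0' :: rest

def next_card_code (card_code : String) : String :=
  String.mk (nextRevA card_code.toList.reverse).reverse

-- ===== PORT B =====
-- the while loop 'while t < n and card_code[n-1-t] == z: t += 1' over the reversed list
def pvCountZ : List Char → Nat
  | [] => 0
  | c :: rest => if c = 'z' then pvCountZ rest + 1 else 0

def next_card_code_alt (card_code : String) : String :=
  let l := card_code.toList
  let n := l.length
  let t := pvCountZ l.reverse
  if t = n then String.mk (List.replicate (n + 1) '0')
  else
    String.mk (l.take (n - 1 - t) ++
      [pvChars.getD (pvFind (l.getD (n - 1 - t) '0') + 1).toNat '0'] ++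
      List.replicate t '0')

-- ===== PRECONDITION & SPEC =====
-- Pre_ excludes only the empty string, on which A raises IndexError (card_code[-1]).
def Pre_next_card_code (card_code : String) : Prop := card_code ≠ ""
instance (card_code : String) : Decidable (Pre_next_card_code card_code) := by unfold Pre_next_card_code; infer_instance
def pvWitness_next_card_code : String := "5bz"

def Spec_next_card_code (card_code : String) (out : String) : Prop := out = next_card_code_alt card_code
instance (card_code : String) (out : String) : Decidable (Spec_next_card_code card_code out) := by unfold Spec_next_card_code; infer_instance

-- ===== CLAIM (what is proved, stated in full; the proofs are below) =====
def Claim_equal_next_card_code : Prop := ∀ (card_code : String), Dom_next_card_code card_code → Pre_next_card_code card_code → Spec_next_card_code card_code (next_card_code card_code)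

-- ===== LEMMAS AND PROOFS =====

theorem pvCountZ_le (r : List Char) : pvCountZ r ≤ r.length := by
  induction r with
  | nil => simp [pvCountZ]
  | cons c rest ih => by_cases h : c = 'z' <;> simp [pvCountZ, h] <;> omega

-- characterisation of A's reversed recursion in B's shape (still on the reversed list)
theorem nextRevA_eq (r : List Char) (hr : r ≠ []) :
    nextRevA r =
      if pvCountZ r = r.length then List.replicate (r.length + 1) '0'
      else List.replicate (pvCountZ r) '0' ++
        pvChars.getD (pvFind (r.getD (pvCountZ r) '0') + 1).toNat '0' :: r.drop (pvCountZ r + 1) := by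
  induction r with
  | nil => exact absurd rfl hr
  | cons c rest ih =>
    by_cases hz : c = 'z'
    · subst hz
      rcases rest with _ | ⟨d, rest'⟩
      · simp [nextRevA, pvCountZ, List.replicate]
      · have hne : (d :: rest') ≠ ([] : List Char) := by simp
        have ih' := ih hne
        have hstep : nextRevA ('z' :: d :: rest') = '0' :: nextRevA (d :: rest') := by
          simp [nextRevA]
        have hcz : pvCountZ ('z' :: d :: rest') = pvCountZ (d :: rest') + 1 := by
          simp [pvCountZ]
        rw [hstep, ih', hcz]
        have hle := pvCountZ_le (d :: rest')
        by_cases hall : pvCountZ (d :: rest') = (d :: rest').length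
        · rw [if_pos hall, if_pos (by simp [hall])]
          simp [List.replicate]
        · have hneq : ¬ (pvCountZ (d :: rest') + 1 = ('z' :: d :: rest').length) := by
            simp only [List.length_cons] at hall ⊢
            omega
          rw [if_neg hall, if_neg hneq]
          simp [List.replicate_succ, List.getD]
    · have h0 : pvCountZ (c :: rest) = 0 := by simp [pvCountZ, hz]
      have hne2 : ¬ (pvCountZ (c :: rest) = (c :: rest).length) := by simp [h0]
      simp [nextRevA, hz, h0]

theorem getD_reverse (l : List Char) (t : Nat) (ht : t < l.length) :
    l.reverse.getD t '0' = l.getD (l.length - 1 - t) '0' := by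
  simp [List.getD, List.getElem?_reverse ht]

theorem drop_reverse_eq_take (l : List Char) (k : Nat) :
    l.reverse.drop k = (l.take (l.length - k)).reverse := by
  rw [← List.reverse_reverse (l.take (l.length - k)), List.reverse_take]
  simp
  omega

-- the un-reversed form: A's result equals B's expression
theorem nextRevA_final (l : List Char) (hl : l ≠ []) :
    (nextRevA l.reverse).reverse =
      if pvCountZ l.reverse = l.length then List.replicate (l.length + 1) '0'
      else l.take (l.length - 1 - pvCountZ l.reverse) ++
        [pvChars.getD (pvFind (l.getD (l.length - 1 - pvCountZ l.reverse) '0') + 1).toNat '0'] ++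
        List.replicate (pvCountZ l.reverse) '0' := by
  have hr : l.reverse ≠ [] := by simpa using hl
  rw [nextRevA_eq l.reverse hr]
  have hle : pvCountZ l.reverse ≤ l.length := by simpa using pvCountZ_le l.reverse
  by_cases hall : pvCountZ l.reverse = l.length
  · rw [if_pos (by simpa using hall), if_pos hall]
    simp
  · rw [if_neg (by simpa using hall), if_neg hall]
    have htlt : pvCountZ l.reverse < l.length := lt_of_le_of_ne hle hall
    have hget := getD_reverse l (pvCountZ l.reverse) htlt
    have hdrop := drop_reverse_eq_take l (pvCountZ l.reverse + 1)
    have hidx : l.length - (pvCountZ l.reverse + 1) = l.length - 1 - pvCountZ l.reverse := by omega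
    rw [List.reverse_append, List.reverse_cons, hdrop, hidx, List.reverse_reverse, hget]
    simp

-- ===== VERDICT (by name: the statement is the Claim_ definition above) =====
theorem next_card_code_spec : Claim_equal_next_card_code := by
  intro s _ hpre
  have hl : s.toList ≠ [] := by
    intro h
    exact hpre (by simpa using congrArg String.ofList h)
  simp only [Spec_next_card_code, next_card_code, next_card_code_alt]
  rw [nextRevA_final s.toList hl]
  split_ifs <;> rfl
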